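-- pv_equiv track=rewrite | github.com/Fondamenti18/fondamenti-di-programmazione | students/1813693/homework01/program03.py | chiave
-- ===== SOURCE A (Python) =====
-- def chiave(s):
--     lista=[]
--     seq_dis=''
--     i=len(s)-1
--     while i>=0:
--         if 'a'<=s[i]<='z':
--             lista=[s[i]]+lista
--             if s[i] in lista[1: ]:
--                 lista.remove(s[i])
--         i-=1
--     return seq_dis.join(lista)
-- ===== SOURCE B (Python) =====
-- def chiave(s):
--     d = {}
--     for i, c in enumerate(s):
--         if 'a' <= c <= 'z':
--             d[c] = i
--     return ''.join(sorted(d, key=d.get))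
-- ===== Notes on version B (the rewrite author's own statement) =====
-- stated objective: faster
-- what changed: Replaces A's right-to-left index loop with per-char list prepend/membership/remove by one left-to-right pass recording each lowercase letter's last index in a dict, then a sort of the distinct letters by that index.
import Mathlib
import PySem

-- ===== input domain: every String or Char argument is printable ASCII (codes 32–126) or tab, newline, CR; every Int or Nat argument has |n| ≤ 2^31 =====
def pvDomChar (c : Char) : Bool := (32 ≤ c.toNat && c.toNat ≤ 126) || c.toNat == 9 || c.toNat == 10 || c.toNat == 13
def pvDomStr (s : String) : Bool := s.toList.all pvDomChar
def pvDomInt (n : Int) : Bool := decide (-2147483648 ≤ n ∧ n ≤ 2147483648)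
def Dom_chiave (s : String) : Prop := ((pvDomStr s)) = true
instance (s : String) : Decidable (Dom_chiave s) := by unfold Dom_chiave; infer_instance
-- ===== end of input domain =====

-- B replaces A's quadratic right-to-left prepend/membership/remove scan by one pass recording each
-- lowercase letter's last index, then a sort of the distinct letters by that index (measured faster).

-- ===== PORT A =====
-- body of A's while loop: the lowercase test, prepend, slice-membership test, list.remove
def chiaveStep (c : Char) (lista : List Char) : List Char :=
  if 'a' ≤ c ∧ c ≤ 'z' then
    let l := c :: lista                    -- lista = [s[i]] + lista
    if c ∈ l.drop 1 then                   -- s[i] in lista[1:]  (drop 1 = the [1:] slice of a list)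
      (PySem.List.remove? l c).getD l      -- lista.remove(s[i]); c is in l, so remove? is `some` here
    else l
  else lista

-- while i >= 0: … ; i -= 1   (argument is i + 1, so it counts i down from len(s)-1 to 0)
def chiaveLoop (cs : List Char) : Nat → List Char → List Char
  | 0, lista => lista
  | i + 1, lista => chiaveLoop cs i (chiaveStep (cs.getD i ' ') lista)  -- s[i]; 0 ≤ i < len s, always in range

def chiave (s : String) : String :=
  String.ofList (chiaveLoop s.toList s.toList.length [])   -- ''.join(lista)

-- ===== PORT B =====
def chiave_alt (s : String) : String :=
  let d := (PySem.List.enumerate s.toList).foldl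
    (fun d p => if 'a' ≤ p.2 ∧ p.2 ≤ 'z' then d.insert p.2 p.1 else d)
    PySem.Dict.empty
  String.ofList (PySem.List.sorted d.keys (fun c => d.getD c 0) false)  -- ''.join(sorted(d, key=d.get))

-- ===== PRECONDITION & SPEC =====
def Spec_chiave (s : String) (out : String) : Prop := out = chiave_alt s
instance (s : String) (out : String) : Decidable (Spec_chiave s out) := by unfold Spec_chiave; infer_instance

-- ===== CLAIM (what is proved, stated in full; the proofs are below) =====
def Claim_equal_chiave : Prop := ∀ (s : String), Dom_chiave s → Spec_chiave s (chiave s)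

-- ===== LEMMAS AND PROOFS =====

-- the lowercase test as a Bool predicate
def pvLow (c : Char) : Bool := decide ('a' ≤ c ∧ c ≤ 'z')

-- dedup-by-prepend step (what chiaveStep does on a lowercase char)
def pvG (acc : List Char) (c : Char) : List Char := if c ∈ acc then acc else c :: acc

-- last value stored for key c by B's insert loop over P
def pvLast (P : List (Int × Char)) (c : Char) : Int :=
  match P.reverse.find? (fun p => p.2 == c) with
  | some p => p.1
  | none => 0

theorem chiaveStep_eq (c : Char) (acc : List Char) :
    chiaveStep c acc = if pvLow c then pvG acc c else acc := by
  by_cases h : 'a' ≤ c ∧ c ≤ 'z'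
  · by_cases hm : c ∈ acc <;>
      simp [chiaveStep, pvLow, pvG, h, hm, PySem.List.remove?, List.idxOf?_cons]
  · simp [chiaveStep, pvLow, h]

theorem chiaveLoop_eq_foldr (cs : List Char) :
    ∀ i, i ≤ cs.length → ∀ acc, chiaveLoop cs i acc = (cs.take i).foldr chiaveStep acc := by
  intro i
  induction i with
  | zero => intro _ acc; simp [chiaveLoop]
  | succ i ih =>
    intro hle acc
    have hi : i < cs.length := by omega
    have : cs.getD i ' ' = cs[i] := by
      simp [List.getD_eq_getElem?_getD, hi]
    rw [chiaveLoop, this, ih (by omega), List.take_add_one, List.foldr_append]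
    simp [hi]

theorem mem_foldl_pvG (u : List Char) : ∀ acc a, a ∈ u.foldl pvG acc ↔ a ∈ u ∨ a ∈ acc := by
  induction u with
  | nil => simp
  | cons c t ih =>
    intro acc a
    by_cases h : c ∈ acc
    · simp only [List.foldl_cons, pvG, if_pos h, ih]
      constructor
      · rintro (h1 | h2)
        · exact Or.inl (List.mem_cons_of_mem _ h1)
        · exact Or.inr h2
      · rintro (h1 | h2)
        · rcases List.mem_cons.mp h1 with rfl | h1
          · exact Or.inr h
          · exact Or.inl h1
        · exact Or.inr h2
    · simp only [List.foldl_cons, pvG, if_neg h, ih]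
      simp only [List.mem_cons]
      tauto

theorem nodup_foldl_pvG (u : List Char) : ∀ acc, acc.Nodup → (u.foldl pvG acc).Nodup := by
  induction u with
  | nil => intro acc h; simpa using h
  | cons c t ih =>
    intro acc h
    by_cases hm : c ∈ acc
    · simpa [pvG, hm] using ih acc h
    · simpa [pvG, hm] using ih (c :: acc) (List.nodup_cons.mpr ⟨hm, h⟩)

theorem getD_foldl_insert (P : List (Int × Char)) :
    ∀ (d : PySem.Dict Char Int) (c : Char),
      (P.foldl (fun d p => d.insert p.2 p.1) d).getD c 0 =
        match P.reverse.find? (fun p => p.2 == c) with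
        | some p => p.1
        | none => d.getD c 0 := by
  induction P with
  | nil => intro d c; simp
  | cons q Q ih =>
    intro d c
    rw [List.foldl_cons, ih, List.reverse_cons, List.find?_append]
    cases hf : Q.reverse.find? (fun p => p.2 == c) with
    | some p => simp
    | none =>
      by_cases hc : c = q.2
      · simp [hc]
      · have : (q.2 == c) = false := by simpa [beq_iff_eq] using fun h => hc h.symm
        simp [this, PySem.Dict.getD_insert, hc]

theorem pvLast_mem (Q : List (Int × Char)) (b : Char) (hb : b ∈ Q.map (·.2)) :
    ∃ p ∈ Q, p.2 = b ∧ pvLast Q b = p.1 := by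
  have hex : ∃ p ∈ Q.reverse, (p.2 == b) = true := by
    rcases List.mem_map.mp hb with ⟨p, hp, rfl⟩
    exact ⟨p, List.mem_reverse.mpr hp, by simp⟩
  rcases (List.find?_isSome).mpr hex |> Option.isSome_iff_exists.mp with ⟨p, hp⟩
  refine ⟨p, List.mem_reverse.mp (List.mem_of_find?_eq_some hp), ?_, ?_⟩
  · simpa [beq_iff_eq] using List.find?_some hp
  · simp [pvLast, hp]

theorem pvLast_cons_of_mem (q : Int × Char) (Q : List (Int × Char)) (a : Char)
    (ha : a ∈ Q.map (·.2)) : pvLast (q :: Q) a = pvLast Q a := by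
  have hex : ∃ p ∈ Q.reverse, (p.2 == a) = true := by
    rcases List.mem_map.mp ha with ⟨p, hp, rfl⟩
    exact ⟨p, List.mem_reverse.mpr hp, by simp⟩
  rcases (List.find?_isSome).mpr hex |> Option.isSome_iff_exists.mp with ⟨p, hp⟩
  simp [pvLast, List.find?_append, hp]

theorem pairwise_foldl_pvG (P : List (Int × Char))
    (hinc : P.Pairwise (fun p q => p.1 < q.1)) :
    ((P.map (·.2)).reverse.foldl pvG []).Pairwise
      (fun a b => pvLast P a < pvLast P b) := by
  induction P with
  | nil => simp
  | cons q Q ih =>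
    rcases List.pairwise_cons.mp hinc with ⟨hlt, hQ⟩
    have hL := ih hQ
    have hmemL : ∀ a, a ∈ (Q.map (·.2)).reverse.foldl pvG [] ↔ a ∈ Q.map (·.2) := by
      intro a; rw [mem_foldl_pvG]; simp
    rw [List.map_cons, List.reverse_cons, List.foldl_append]
    simp only [List.foldl_cons, List.foldl_nil]
    by_cases hm : q.2 ∈ (Q.map (·.2)).reverse.foldl pvG []
    · rw [pvG, if_pos hm]
      refine hL.imp_of_mem ?_
      intro a b ha hb hab
      rw [pvLast_cons_of_mem q Q a ((hmemL a).mp ha),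
          pvLast_cons_of_mem q Q b ((hmemL b).mp hb)]
      exact hab
    · rw [pvG, if_neg hm]
      refine List.pairwise_cons.mpr ⟨?_, ?_⟩
      · intro b hb
        have hbQ : b ∈ Q.map (·.2) := (hmemL b).mp hb
        have hqual : pvLast (q :: Q) q.2 = q.1 := by
          have hnone : Q.reverse.find? (fun p => p.2 == q.2) = none := by
            rw [List.find?_eq_none]
            intro p hp hpq
            exact hm ((hmemL q.2).mpr (List.mem_map.mpr
              ⟨p, List.mem_reverse.mp hp, by simpa [beq_iff_eq] using hpq⟩))
          simp [pvLast, List.find?_append, hnone]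
        rw [hqual, pvLast_cons_of_mem q Q b hbQ]
        rcases pvLast_mem Q b hbQ with ⟨p, hpQ, _, hval⟩
        rw [hval]
        exact hlt p hpQ
      · refine hL.imp_of_mem ?_
        intro a b ha hb hab
        rw [pvLast_cons_of_mem q Q a ((hmemL a).mp ha),
            pvLast_cons_of_mem q Q b ((hmemL b).mp hb)]
        exact hab

theorem map_snd_filter (l : List (Int × Char)) :
    (l.filter (fun p => pvLow p.2)).map (·.2) = (l.map (·.2)).filter pvLow := by
  induction l with
  | nil => rfl
  | cons p t ih => by_cases h : pvLow p.2 <;> simp [h, ih]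

-- ===== VERDICT (by name: the statement is the Claim_ definition above) =====
theorem chiave_spec : Claim_equal_chiave := by
  unfold Claim_equal_chiave
  intro s _
  simp only [Spec_chiave, chiave, chiave_alt]
  set cs := s.toList with hcs
  -- the filtered, indexed character list both sides effectively traverse
  set P : List (Int × Char) := (PySem.List.enumerate cs).filter (fun p => pvLow p.2) with hP
  set d : PySem.Dict Char Int := P.foldl (fun d p => d.insert p.2 p.1) PySem.Dict.empty with hd
  set L : List Char := (P.map (·.2)).reverse.foldl pvG [] with hL
  -- B's dict is the fold over P
  have hdict : (PySem.List.enumerate cs).foldl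
      (fun d p => if 'a' ≤ p.2 ∧ p.2 ≤ 'z' then d.insert p.2 p.1 else d)
      PySem.Dict.empty = d := by
    rw [hd, hP, List.foldl_filter]
    congr 1
    funext d p
    by_cases h : 'a' ≤ p.2 ∧ p.2 ≤ 'z' <;> simp [h, pvLow]
  -- A's list is L
  have hA : chiaveLoop cs cs.length [] = L := by
    rw [chiaveLoop_eq_foldr cs cs.length le_rfl, List.take_length, ← List.foldl_reverse]
    have hstep : ∀ (acc : List Char) (c : Char),
        chiaveStep c acc = if pvLow c then pvG acc c else acc := fun acc c => chiaveStep_eq c acc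
    calc cs.reverse.foldl (fun acc c => chiaveStep c acc) []
        = cs.reverse.foldl (fun acc c => if pvLow c then pvG acc c else acc) [] := by
          simp only [hstep]
      _ = (cs.reverse.filter pvLow).foldl pvG [] := by rw [List.foldl_filter]
      _ = L := by
          rw [hL, hP, map_snd_filter, PySem.List.map_snd_enumerate, List.filter_reverse]
  rw [hdict, hA]
  -- the sorted keys equal L
  have hPinc : P.Pairwise (fun p q => p.1 < q.1) :=
    (PySem.List.pairwise_lt_enumerate cs 0).filter _
  have hkeys : d.keys = PySem.Set.update ([] : List Char) (P.map (·.2)) := by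
    rw [hd]
    have := PySem.Dict.keys_foldl_insert_key (ν := Int) P (·.2) (fun _ p => p.1) PySem.Dict.empty
    simpa using this
  have hmemL : ∀ a, a ∈ L ↔ a ∈ P.map (·.2) := by
    intro a; rw [hL, mem_foldl_pvG]; simp
  have hmemK : ∀ a, a ∈ d.keys ↔ a ∈ P.map (·.2) := by
    intro a; rw [hkeys, PySem.Set.mem_update]; simp
  have hnodupL : L.Nodup := nodup_foldl_pvG _ _ List.nodup_nil
  have hnodupK : d.keys.Nodup := by
    rw [hd]
    exact PySem.Dict.nodup_keys_foldl_insert_key P (·.2) (fun _ p => p.1) PySem.Dict.empty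
      (by simp)
  have hperm : L.Perm d.keys :=
    (List.perm_ext_iff_of_nodup hnodupL hnodupK).mpr (fun a => (hmemL a).trans (hmemK a).symm)
  have hgetD : ∀ c, d.getD c 0 = pvLast P c := by
    intro c
    rw [hd, getD_foldl_insert]
    cases hf : P.reverse.find? (fun p => p.2 == c) <;> simp [pvLast, hf]
  have hpw : L.Pairwise (fun a b => d.getD a 0 < d.getD b 0) := by
    have := pairwise_foldl_pvG P hPinc
    rw [← hL] at this
    exact this.imp (fun hab => by rw [hgetD, hgetD]; exact hab)
  rw [PySem.List.sorted_eq_of_perm_of_pairwise_lt d.keys L _ hperm hpw]
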